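-- pv_equiv track=rewrite | github.com/daniel-reich/ubiquitous-fiesta | zp64GNJQpZyGpYWL8_20.py | score_it
-- ===== SOURCE A (Python) =====
-- def score_it(s):
--     op, r, j = 0, 0, ""
--     for i in s:
--         if i == "(":
--             if j != "":
--                 r += op * int(j)
--                 j = ""
--             op += 1
--         elif i == ")":
--             if j != "":
--                 r += op * int(j)
--                 j = ""
--             op -= 1
--         elif i.isnumeric() and op > 0:
--             j += i
--     return r
-- ===== SOURCE B (Python) =====
-- def score_it(s):
--     # Tokenise into alternating text / "(" / ")" tokens (trailing text is
--     # never emitted, so trailing digits are naturally dropped), then fold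
--     # over the tokens maintaining only depth and the running score.
--     tokens = []
--     buf = []
--     for c in s:
--         if c == "(" or c == ")":
--             tokens.append("".join(buf))
--             tokens.append(c)
--             buf = []
--         else:
--             buf.append(c)
--     r, depth = 0, 0
--     for t in tokens:
--         if t == "(":
--             depth += 1
--         elif t == ")":
--             depth -= 1
--         elif depth > 0:
--             d = "".join(ch for ch in t if ch.isnumeric())
--             if d:
--                 r += depth * int(d)
--     return r
-- ===== Notes on version B (the rewrite author's own statement) =====
-- stated objective: alternative
-- what changed: B first tokenises the string into alternating text/paren tokens and then folds over tokens, scoring each whole text segment at once via a filter+int at its closing paren boundary, instead of A's single char-by-char loop that threads a digit buffer through the state.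
import Mathlib
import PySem

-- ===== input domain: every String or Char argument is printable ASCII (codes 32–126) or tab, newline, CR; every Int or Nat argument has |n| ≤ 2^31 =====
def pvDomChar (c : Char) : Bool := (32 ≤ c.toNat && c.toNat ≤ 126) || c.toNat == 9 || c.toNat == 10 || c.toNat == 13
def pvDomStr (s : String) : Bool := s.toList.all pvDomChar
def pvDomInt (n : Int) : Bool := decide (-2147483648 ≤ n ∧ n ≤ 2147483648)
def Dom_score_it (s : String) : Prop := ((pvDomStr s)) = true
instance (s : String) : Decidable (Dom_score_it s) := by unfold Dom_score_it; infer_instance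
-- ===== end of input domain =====

-- B tokenises on parens and folds over tokens instead of A's char-by-char loop threading a digit buffer; same cost (objective: alternative decomposition).

-- int(j): j is always a nonempty run of digits here, so ofStr? succeeds; getD 0 is unreachable
def pvIntOf (j : List Char) : Int := (PySem.Int.ofStr? (String.ofList j)).getD 0

-- ===== PORT A =====
-- loop body of A's for-loop; i.isnumeric() = isdigit on the printable-ASCII domain
def pvStepA (st : Int × Int × List Char) (i : Char) : Int × Int × List Char :=
  match st with
  | (op, r, j) =>
    if i = '(' then
      if j ≠ [] then (op + 1, r + op * pvIntOf j, ([] : List Char)) else (op + 1, r, j)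
    else if i = ')' then
      if j ≠ [] then (op - 1, r + op * pvIntOf j, ([] : List Char)) else (op - 1, r, j)
    else if PySem.Chars.isdigit i ∧ op > 0 then (op, r, j ++ [i])
    else (op, r, j)

def score_it (s : String) : Int :=
  (s.toList.foldl pvStepA (0, 0, ([] : List Char))).2.1

-- ===== PORT B =====
-- first loop of B: split the char list into alternating text / "(" / ")" tokens; trailing text dropped
def pvTokenize (cs : List Char) (buf : List Char) : List (List Char) :=
  match cs with
  | [] => []
  | c :: rest =>
    if c = '(' ∨ c = ')' then buf :: [c] :: pvTokenize rest []
    else pvTokenize rest (buf ++ [c])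

-- second loop of B over the tokens (state r, depth); ch.isnumeric() = isdigit on the printable-ASCII domain
def pvScore (ts : List (List Char)) (r depth : Int) : Int :=
  match ts with
  | [] => r
  | t :: rest =>
    if t = ['('] then pvScore rest r (depth + 1)
    else if t = [')'] then pvScore rest r (depth - 1)
    else if depth > 0 then
      let d := t.filter PySem.Chars.isdigit
      if d ≠ [] then pvScore rest (r + depth * pvIntOf d) depth
      else pvScore rest r depth
    else pvScore rest r depth

def score_it_alt (s : String) : Int := pvScore (pvTokenize s.toList []) 0 0

-- ===== PRECONDITION & SPEC =====
def Spec_score_it (s : String) (out : Int) : Prop := out = score_it_alt s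
instance (s : String) (out : Int) : Decidable (Spec_score_it s out) := by unfold Spec_score_it; infer_instance

-- ===== CLAIM (what is proved, stated in full; the proofs are below) =====
def Claim_equal_score_it : Prop := ∀ (s : String), Dom_score_it s → Spec_score_it s (score_it s)

-- ===== LEMMAS AND PROOFS =====

-- A's digit buffer, expressed from B's text buffer and the current depth
def pvJOf (op : Int) (buf : List Char) : List Char :=
  if op > 0 then buf.filter PySem.Chars.isdigit else []

theorem pvJOf_nonpos {op : Int} (h : ¬ op > 0) (buf : List Char) : pvJOf op buf = [] := by
  simp [pvJOf, h]

theorem pv_key : ∀ (cs buf : List Char) (op r : Int),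
    '(' ∉ buf → ')' ∉ buf →
    (cs.foldl pvStepA (op, r, pvJOf op buf)).2.1 = pvScore (pvTokenize cs buf) r op := by
  intro cs
  induction cs with
  | nil => intro buf op r _ _; simp [pvTokenize, pvScore]
  | cons c rest ih =>
    intro buf op r hl hr
    by_cases hc : c = '(' ∨ c = ')'
    · -- paren: flush on A's side, text token + paren token on B's side
      have hbl : buf ≠ ['('] := by intro h; subst h; simp at hl
      have hbr : buf ≠ [')'] := by intro h; subst h; simp at hr
      have hstep : pvStepA (op, r, pvJOf op buf) c =
          ((if c = '(' then op + 1 else op - 1),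
           (if pvJOf op buf ≠ [] then r + op * pvIntOf (pvJOf op buf) else r),
           ([] : List Char)) := by
        rcases hc with h | h <;> subst h <;> by_cases hj : pvJOf op buf = [] <;>
          simp [pvStepA, hj]
      have htok : pvTokenize (c :: rest) buf = buf :: [c] :: pvTokenize rest [] := by
        simp [pvTokenize, hc]
      have hrec := ih [] (if c = '(' then op + 1 else op - 1)
        (if pvJOf op buf ≠ [] then r + op * pvIntOf (pvJOf op buf) else r) (by simp) (by simp)
      rw [show pvJOf (if c = '(' then op + 1 else op - 1) [] = [] from by simp [pvJOf]] at hrec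
      rw [List.foldl_cons, hstep, hrec, htok]
      by_cases hop : op > 0
      · have hb : pvJOf op buf = buf.filter PySem.Chars.isdigit := by simp [pvJOf, hop]
        rcases hc with h | h <;> subst h <;>
          by_cases hd : buf.filter PySem.Chars.isdigit = [] <;>
          simp [pvScore, hbl, hbr, hop, hd, hb]
      · have hb : pvJOf op buf = [] := pvJOf_nonpos hop buf
        rcases hc with h | h <;> subst h <;>
          simp [pvScore, hbl, hbr, hop, hb]
    · -- ordinary char: goes into the buffer on B's side, maybe into j on A's side
      push Not at hc
      have htok : pvTokenize (c :: rest) buf = pvTokenize rest (buf ++ [c]) := by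
        simp [pvTokenize, hc.1, hc.2]
      have hstep : pvStepA (op, r, pvJOf op buf) c = (op, r, pvJOf op (buf ++ [c])) := by
        by_cases hop : op > 0
        · by_cases hdig : PySem.Chars.isdigit c = true <;>
            simp [pvStepA, hc.1, hc.2, hop, hdig, pvJOf]
        · simp [pvStepA, hc.1, hc.2, hop, pvJOf_nonpos hop]
      rw [List.foldl_cons, hstep, htok]
      exact ih (buf ++ [c]) op r (by simp [hl, Ne.symm hc.1]) (by simp [hr, Ne.symm hc.2])

-- ===== VERDICT (by name: the statement is the Claim_ definition above) =====
theorem score_it_spec : Claim_equal_score_it := by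
  intro s _
  show score_it s = score_it_alt s
  have := pv_key s.toList [] 0 0 (by simp) (by simp)
  simpa [score_it, score_it_alt, pvJOf] using this
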